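-- pv_equiv track=rewrite | github.com/hustyichi/dify-rag | dify_rag/extractor/pdf_extractor.py | _get_lines_toc
-- ===== SOURCE A (Python) =====
-- def _get_lines_toc(toc, lines, lines_page_idx):
--     """获取TOC的行索引"""
--     lines_toc = []
--     for level, title, page in toc:
--         # 在目标页中查找包含该标题的行
--         title_line_idx = next(
--             (i for i, idx in enumerate(lines_page_idx)
--                 if idx == page - 1 and
--                 (title in lines[i] or title.replace(" ", "") in lines[i])),
--             None
--             )
--         if title_line_idx is not None:
--             lines_toc.append((level, title, title_line_idx))
--     return lines_toc
-- ===== SOURCE B (Python) =====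
-- # B: one pass groups line indices by page into a dict, then each TOC title scans only its page's lines.
-- def _get_lines_toc(toc, lines, lines_page_idx):
--     pages = {}
--     for i, (idx, line) in enumerate(zip(lines_page_idx, lines)):
--         pages.setdefault(idx, []).append((i, line))
--     lines_toc = []
--     for level, title, page in toc:
--         stripped = title.replace(" ", "")
--         for i, line in pages.get(page - 1, []):
--             if title in line or stripped in line:
--                 lines_toc.append((level, title, i))
--                 break
--     return lines_toc
-- ===== Notes on version B (the rewrite author's own statement) =====
-- stated objective: faster
-- what changed: Instead of rescanning all of lines_page_idx for every TOC entry, B builds in one pass a dict from page index to that page's (line index, line) pairs and each title scans only its own page's lines.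
-- outside the precondition, e.g. on _get_lines_toc([(1, 'a', 7)], ['a here'], [6, 6]): A returns [(1, 'a', 0)], B returns [(1, 'a', 0)]
import Mathlib
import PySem

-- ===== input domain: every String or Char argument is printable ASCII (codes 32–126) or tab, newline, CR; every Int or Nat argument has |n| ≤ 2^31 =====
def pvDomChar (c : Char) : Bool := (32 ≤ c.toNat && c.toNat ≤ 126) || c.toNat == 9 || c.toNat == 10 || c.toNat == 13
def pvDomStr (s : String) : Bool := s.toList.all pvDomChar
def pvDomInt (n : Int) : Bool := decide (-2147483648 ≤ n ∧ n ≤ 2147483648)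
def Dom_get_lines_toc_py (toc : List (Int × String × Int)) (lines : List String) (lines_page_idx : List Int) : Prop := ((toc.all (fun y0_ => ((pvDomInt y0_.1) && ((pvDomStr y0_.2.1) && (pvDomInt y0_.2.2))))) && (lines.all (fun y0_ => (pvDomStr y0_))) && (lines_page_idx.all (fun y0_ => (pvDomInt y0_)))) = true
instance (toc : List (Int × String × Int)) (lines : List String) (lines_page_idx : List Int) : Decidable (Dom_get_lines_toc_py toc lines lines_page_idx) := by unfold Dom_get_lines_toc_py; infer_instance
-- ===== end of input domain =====

-- B groups line indices by page into a dict built in one pass so each TOC title scans only its page's lines (asymptotically faster in a timing run).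


-- ===== PORT A =====
-- condition of A's generator: idx == page - 1 and (title in lines[i] or title.replace(" ", "") in lines[i])
-- (lines[i] as pyGetD lines i "": inside Pre_ the access is always in range, so the default is never the value)
def pvCondA (lines : List String) (title : String) (page : Int) (q : Int × Int) : Bool :=
  q.2 == page - 1 &&
    (PySem.Str.isIn title (PySem.List.pyGetD lines q.1 "") ||
     PySem.Str.isIn (PySem.Str.replace title " " "") (PySem.List.pyGetD lines q.1 ""))

def get_lines_toc_py (toc : List (Int × String × Int)) (lines : List String) (lines_page_idx : List Int) : List (Int × String × Int) :=
  toc.foldl (fun acc t =>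
    match ((PySem.List.enumerate lines_page_idx 0).find? (pvCondA lines t.2.1 t.2.2)).map (fun q => q.1) with
    | some i => acc ++ [(t.1, t.2.1, i)]
    | none => acc) []

-- ===== PORT B =====
-- pages.setdefault(idx, []).append((i, line)) over enumerate(zip(lines_page_idx, lines))
def pvPages (lines_page_idx : List Int) (lines : List String) : PySem.Dict Int (List (Int × String)) :=
  (PySem.List.enumerate (lines_page_idx.zip lines) 0).foldl
    (fun d q => d.modify q.2.1 [] (fun v => v ++ [(q.1, q.2.2)])) PySem.Dict.empty

-- the inner 'for i, line in …: if …: append; break' loop, returning the appended index if any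
def pvScan (title stripped : String) : List (Int × String) → Option Int
  | [] => none
  | r :: rest =>
    if PySem.Str.isIn title r.2 || PySem.Str.isIn stripped r.2 then some r.1
    else pvScan title stripped rest

def get_lines_toc_py_alt (toc : List (Int × String × Int)) (lines : List String) (lines_page_idx : List Int) : List (Int × String × Int) :=
  let pages := pvPages lines_page_idx lines
  toc.foldl (fun acc t =>
    match pvScan t.2.1 (PySem.Str.replace t.2.1 " " "") (pages.getD (t.2.2 - 1) []) with
    | some i => acc ++ [(t.1, t.2.1, i)]
    | none => acc) []

-- ===== PRECONDITION & SPEC =====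
-- Pre_ excludes inputs where some entry of lines_page_idx beyond the length of lines names a page
-- listed in toc: there A's scan can evaluate lines[i] out of range and raise IndexError (and where A
-- happens to return early its value never depends on those entries, so this is slightly narrower
-- than the exact raise condition — see the cite in claim.json).
def Pre_get_lines_toc_py (toc : List (Int × String × Int)) (lines : List String) (lines_page_idx : List Int) : Prop :=
  ∀ x ∈ lines_page_idx.drop lines.length, ∀ t ∈ toc, x ≠ t.2.2 - 1
instance (toc : List (Int × String × Int)) (lines : List String) (lines_page_idx : List Int) : Decidable (Pre_get_lines_toc_py toc lines lines_page_idx) := by unfold Pre_get_lines_toc_py; infer_instance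

def pvWitness_get_lines_toc_py : (List (Int × String × Int)) × List String × List Int :=
  ([(1, "Intro", 1)], ["x Intro y"], [0])

def Spec_get_lines_toc_py (toc : List (Int × String × Int)) (lines : List String) (lines_page_idx : List Int) (out : List (Int × String × Int)) : Prop := out = get_lines_toc_py_alt toc lines lines_page_idx
instance (toc : List (Int × String × Int)) (lines : List String) (lines_page_idx : List Int) (out : List (Int × String × Int)) : Decidable (Spec_get_lines_toc_py toc lines lines_page_idx out) := by unfold Spec_get_lines_toc_py; infer_instance

-- ===== CLAIM (what is proved, stated in full; the proofs are below) =====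
def Claim_equal_get_lines_toc_py : Prop := ∀ (toc : List (Int × String × Int)) (lines : List String) (lines_page_idx : List Int), Dom_get_lines_toc_py toc lines lines_page_idx → Pre_get_lines_toc_py toc lines lines_page_idx → Spec_get_lines_toc_py toc lines lines_page_idx (get_lines_toc_py toc lines lines_page_idx)

-- ===== LEMMAS AND PROOFS =====

-- the common predicate both scans reduce to, over enumerate(zip(lines_page_idx, lines))
def pvP (title stripped : String) (page : Int) (q : Int × Int × String) : Bool :=
  q.2.1 == page - 1 && (PySem.Str.isIn title q.2.2 || PySem.Str.isIn stripped q.2.2)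

theorem pvFind?_congr_mem {α : Type} (l : List α) (p q : α → Bool)
    (h : ∀ a ∈ l, p a = q a) : l.find? p = l.find? q := by
  induction l with
  | nil => rfl
  | cons x xs ih =>
    simp only [List.find?_cons, h x (List.mem_cons_self)]
    exact if hq : q x then by simp [hq] else by
      simp [hq]; exact ih (fun a ha => h a (List.mem_cons_of_mem _ ha))

theorem pvZip_take {α β : Type} (l1 : List α) (l2 : List β) :
    l1.zip l2 = (l1.take l2.length).zip l2 := by
  induction l1 generalizing l2 with
  | nil => simp
  | cons x xs ih =>
    cases l2 with
    | nil => simp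
    | cons y ys => simp [List.zip_cons_cons, ih ys]

theorem pvEnumerate_map {α β : Type} (f : α → β) (l : List α) (s : Int) :
    PySem.List.enumerate (l.map f) s = (PySem.List.enumerate l s).map (fun q => (q.1, f q.2)) := by
  induction l generalizing s with
  | nil => simp [PySem.List.enumerate_nil]
  | cons x xs ih => simp [PySem.List.enumerate_cons, ih]

theorem pvScan_eq_find? (title stripped : String) (l : List (Int × String)) :
    pvScan title stripped l
      = (l.find? (fun r => PySem.Str.isIn title r.2 || PySem.Str.isIn stripped r.2)).map (fun r => r.1) := by
  induction l with
  | nil => rfl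
  | cons r rest ih =>
    rw [pvScan]
    cases hb : (PySem.Str.isIn title r.2 || PySem.Str.isIn stripped r.2) with
    | true => simp only [List.find?_cons, hb, if_true, Option.map_some]
    | false => simp only [List.find?_cons, hb, Bool.false_eq_true, if_false, ih]

theorem pvPages_getD (lines_page_idx : List Int) (lines : List String) (p : Int) :
    (pvPages lines_page_idx lines).getD p []
      = ((PySem.List.enumerate (lines_page_idx.zip lines) 0).filter (fun q => q.2.1 == p)).map
          (fun q => (q.1, q.2.2)) := by
  unfold pvPages
  have h1 : (((PySem.List.enumerate (lines_page_idx.zip lines) 0).map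
          (fun q => (q.2.1, (q.1, q.2.2)))).foldl
          (fun d r => d.modify r.1 [] (fun v => v ++ [r.2])) PySem.Dict.empty)
      = ((PySem.List.enumerate (lines_page_idx.zip lines) 0).foldl
        (fun d q => d.modify q.2.1 [] (fun v => v ++ [(q.1, q.2.2)])) PySem.Dict.empty) :=
    List.foldl_map
  rw [← h1, PySem.Dict.getD_foldl_modify_append, PySem.Dict.getD_empty]
  simp [List.filter_map, Function.comp_def, List.map_map]

theorem pvB_eq (lines_page_idx : List Int) (lines : List String) (title stripped : String) (page : Int) :
    pvScan title stripped ((pvPages lines_page_idx lines).getD (page - 1) [])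
      = ((PySem.List.enumerate (lines_page_idx.zip lines) 0).find? (pvP title stripped page)).map
          (fun q => q.1) := by
  rw [pvPages_getD, pvScan_eq_find?, List.find?_map, List.find?_filter, Option.map_map]
  refine congrArg (Option.map _) (pvFind?_congr_mem _ _ _ ?_)
  intro q _
  simp [pvP, Bool.beq_eq_decide_eq]

theorem pvA_eq (lines_page_idx : List Int) (lines : List String) (title : String) (page : Int)
    (h : ∀ x ∈ lines_page_idx.drop lines.length, x ≠ page - 1) :
    ((PySem.List.enumerate lines_page_idx 0).find? (pvCondA lines title page)).map (fun q => q.1)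
      = ((PySem.List.enumerate (lines_page_idx.zip lines) 0).find?
          (pvP title (PySem.Str.replace title " " "") page)).map (fun q => q.1) := by
  conv_lhs => rw [show lines_page_idx = lines_page_idx.take lines.length ++ lines_page_idx.drop lines.length
    from (List.take_append_drop _ _).symm]
  rw [PySem.List.enumerate_append, List.find?_append]
  have hdrop : (PySem.List.enumerate (lines_page_idx.drop lines.length)
      (0 + ((lines_page_idx.take lines.length).length : Int))).find? (pvCondA lines title page) = none := by
    rw [List.find?_eq_none]
    intro q hq
    rw [PySem.List.mem_enumerate_iff] at hq
    obtain ⟨k, hk, rfl⟩ := hq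
    have hx := h _ (List.getElem_mem hk)
    rw [List.getElem_drop] at hx
    simp [pvCondA, hx]
  rw [hdrop, Option.or_none]
  rw [pvZip_take lines_page_idx lines]
  have hT : (lines_page_idx.take lines.length).length ≤ lines.length := by
    simp [List.length_take]
  have henum : PySem.List.enumerate (lines_page_idx.take lines.length) 0
      = (PySem.List.enumerate ((lines_page_idx.take lines.length).zip lines) 0).map
          (fun q => (q.1, q.2.1)) := by
    conv_lhs => rw [show lines_page_idx.take lines.length
      = ((lines_page_idx.take lines.length).zip lines).map Prod.fst from (List.map_fst_zip hT).symm]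
    exact pvEnumerate_map _ _ _
  rw [henum, List.find?_map, Option.map_map]
  rw [pvFind?_congr_mem _ _ (pvP title (PySem.Str.replace title " " "") page) ?_]
  · rfl
  · intro q hq
    rw [PySem.List.mem_enumerate_iff] at hq
    obtain ⟨k, hk, rfl⟩ := hq
    have hkl : k < lines.length := lt_of_lt_of_le (by simpa using hk) hT
    simp [pvCondA, pvP, List.getElem_zip, List.getElem?_eq_getElem hkl]

-- ===== VERDICT (by name: the statement is the Claim_ definition above) =====
theorem get_lines_toc_py_spec : Claim_equal_get_lines_toc_py := by
  intro toc lines lines_page_idx _ hpre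
  unfold Spec_get_lines_toc_py get_lines_toc_py get_lines_toc_py_alt
  refine PySem.List.foldl_congr_mem _ _ _ _ ?_
  intro acc t ht
  rw [pvB_eq, ← pvA_eq lines_page_idx lines t.2.1 t.2.2 (fun x hx => hpre x hx t ht)]
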